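-- pv_equiv track=rewrite | github.com/Bharadwaja92/CompetitiveCoding | CodeSignal/TheCore/LoopTunnel/MagicalWell.py | magicalWell1
-- ===== SOURCE A (Python) =====
-- def magicalWell1(a, b, n):
--     sum = 0
--     while n > 0:
--         sum += (a*b)
--         a += 1
--         b += 1
--         n -= 1
--     return sum
-- ===== SOURCE B (Python) =====
-- def magicalWell1(a, b, n):
--     if n <= 0:
--         return 0
--     # sum_{i=0}^{n-1} (a+i)(b+i) in closed form
--     return n*a*b + (a + b) * (n*(n-1)//2) + (n-1)*n*(2*n-1)//6
-- ===== Notes on version B (the rewrite author's own statement) =====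
-- stated objective: faster
-- what changed: replaced the O(n) while-loop accumulation of (a+i)(b+i) with the O(1) closed-form n*a*b + (a+b)*n(n-1)/2 + (n-1)n(2n-1)/6
import Mathlib
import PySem

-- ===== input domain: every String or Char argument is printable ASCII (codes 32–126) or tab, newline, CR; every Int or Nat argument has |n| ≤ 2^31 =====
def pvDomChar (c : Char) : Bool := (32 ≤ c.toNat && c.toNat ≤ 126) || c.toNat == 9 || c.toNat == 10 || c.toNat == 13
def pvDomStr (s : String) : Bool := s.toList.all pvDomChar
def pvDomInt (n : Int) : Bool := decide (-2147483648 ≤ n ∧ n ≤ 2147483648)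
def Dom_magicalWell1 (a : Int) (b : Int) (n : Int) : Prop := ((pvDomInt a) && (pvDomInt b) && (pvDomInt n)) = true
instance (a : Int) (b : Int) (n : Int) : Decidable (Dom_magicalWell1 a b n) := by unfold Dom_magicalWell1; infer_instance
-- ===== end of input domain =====

-- B replaces A's O(n) while-loop summing (a+i)(b+i) with the O(1) closed form (objective: faster, asymptotic).

-- ===== PORT A =====
-- the while loop of A: state (sum, a, b, n), iterated while n > 0
def magicalWell1.loop (a : Int) (b : Int) (n : Int) (sum : Int) : Int :=
  if 0 < n then magicalWell1.loop (a + 1) (b + 1) (n - 1) (sum + a * b) else sum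
termination_by n.toNat
decreasing_by omega

def magicalWell1 (a : Int) (b : Int) (n : Int) : Int :=
  magicalWell1.loop a b n 0

-- ===== PORT B =====
def magicalWell1_alt (a : Int) (b : Int) (n : Int) : Int :=
  if n ≤ 0 then 0
  else n * a * b + (a + b) * PySem.Int.floordiv (n * (n - 1)) 2
        + PySem.Int.floordiv ((n - 1) * n * (2 * n - 1)) 6

-- ===== PRECONDITION & SPEC =====
def Spec_magicalWell1 (a : Int) (b : Int) (n : Int) (out : Int) : Prop := out = magicalWell1_alt a b n
instance (a : Int) (b : Int) (n : Int) (out : Int) : Decidable (Spec_magicalWell1 a b n out) := by unfold Spec_magicalWell1; infer_instance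

-- ===== CLAIM (what is proved, stated in full; the proofs are below) =====
def Claim_equal_magicalWell1 : Prop := ∀ (a : Int) (b : Int) (n : Int), Dom_magicalWell1 a b n → Spec_magicalWell1 a b n (magicalWell1 a b n)

-- ===== LEMMAS AND PROOFS =====

-- 6 × the loop's result, as a polynomial: induction on the Nat measure k = n
theorem magicalWell1_loop_six (k : Nat) : ∀ (a b sum : Int),
    6 * magicalWell1.loop a b (k : Int) sum
      = 6 * sum + 6 * (k : Int) * a * b + 3 * (a + b) * ((k : Int) * ((k : Int) - 1))
        + ((k : Int) - 1) * (k : Int) * (2 * (k : Int) - 1) := by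
  induction k with
  | zero => intro a b sum; rw [magicalWell1.loop]; norm_num
  | succ m ih =>
    intro a b sum
    rw [magicalWell1.loop]
    have hpos : (0 : Int) < ((m + 1 : Nat) : Int) := by exact_mod_cast Nat.succ_pos m
    simp only [hpos, if_pos]
    have : ((m + 1 : Nat) : Int) - 1 = (m : Int) := by push_cast; ring
    rw [this, ih]
    push_cast
    ring

theorem magicalWell1_eq_alt (a b n : Int) : magicalWell1 a b n = magicalWell1_alt a b n := by
  unfold magicalWell1 magicalWell1_alt
  by_cases h : n ≤ 0
  · rw [magicalWell1.loop]
    simp [h, not_lt.mpr h]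
  · push Not at h
    simp only [not_le.mpr h, if_false]
    obtain ⟨k, hk⟩ : ∃ k : Nat, n = (k : Int) := ⟨n.toNat, by omega⟩
    subst hk
    have h6 := magicalWell1_loop_six k a b 0
    have h2 : PySem.Int.floordiv ((k : Int) * ((k : Int) - 1)) 2
        = (k : Int) * ((k : Int) - 1) / 2 :=
      PySem.Int.floordiv_eq_ediv_of_pos (by norm_num)
    have h6' : PySem.Int.floordiv (((k : Int) - 1) * (k : Int) * (2 * (k : Int) - 1)) 6
        = ((k : Int) - 1) * (k : Int) * (2 * (k : Int) - 1) / 6 :=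
      PySem.Int.floordiv_eq_ediv_of_pos (by norm_num)
    rw [h2, h6']
    have d2 : (2 : Int) ∣ (k : Int) * ((k : Int) - 1) := by
      have : (2:Int) ∣ (k : Int) ∨ (2:Int) ∣ ((k : Int) - 1) := by omega
      rcases this with h | h
      · exact Dvd.dvd.mul_right h _
      · exact Dvd.dvd.mul_left h _
    have d6 : (6 : Int) ∣ ((k : Int) - 1) * (k : Int) * (2 * (k : Int) - 1) := by
      have h2' : (2 : Int) ∣ ((k : Int) - 1) * (k : Int) * (2 * (k : Int) - 1) :=
        Dvd.dvd.mul_right (by rwa [mul_comm] at d2 : (2:Int) ∣ ((k : Int) - 1) * (k : Int)) _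
      have h3' : (3 : Int) ∣ ((k : Int) - 1) * (k : Int) * (2 * (k : Int) - 1) := by
        have hm : (k : Int) % 3 = 0 ∨ (k : Int) % 3 = 1 ∨ (k : Int) % 3 = 2 := by omega
        rcases hm with h | h | h
        · exact Dvd.dvd.mul_right (Dvd.dvd.mul_left (by omega : (3:Int) ∣ (k : Int)) _) _
        · exact Dvd.dvd.mul_right (Dvd.dvd.mul_right (by omega : (3:Int) ∣ ((k : Int) - 1)) _) _
        · exact Dvd.dvd.mul_left (by omega : (3:Int) ∣ (2 * (k : Int) - 1)) _
      obtain ⟨u, hu⟩ := h2'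
      obtain ⟨v, hv⟩ := h3'
      exact ⟨u - v, by omega⟩
    obtain ⟨t2, ht2⟩ := d2
    obtain ⟨t6, ht6⟩ := d6
    rw [ht2, ht6, Int.mul_ediv_cancel_left _ (by norm_num : (2:Int) ≠ 0),
        Int.mul_ediv_cancel_left _ (by norm_num : (6:Int) ≠ 0)]
    have key : 6 * magicalWell1.loop a b (k : Int) 0
        = 6 * ((k : Int) * a * b + (a + b) * t2 + t6) := by
      linear_combination h6 + 3 * (a + b) * ht2 + ht6
    omega

-- ===== VERDICT (by name: the statement is the Claim_ definition above) =====
theorem magicalWell1_spec : Claim_equal_magicalWell1 := by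
  intro a b n _
  exact magicalWell1_eq_alt a b n
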